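-- pv_equiv track=rewrite | github.com/takushi-m/atcoder-work | work/code_thanks_festival_2018_c.py | f
-- ===== SOURCE A (Python) =====
-- def f(n,xl):
--     res = 0
--     xl.sort()
--
--     s = 0
--     for i in range(1,n):
--         s += (xl[i]-xl[i-1])*i
--         res += s
--     return res
-- ===== SOURCE B (Python) =====
-- def f(n, xl):
--     # Same in-place sort side effect as A; return value computed by a
--     # single accumulator with the closed-form coefficient per element.
--     xl.sort()
--     if n <= 1:
--         return 0
--     res = 0
--     for i in range(n):
--         res += xl[i] * (2 * i - (n - 1))
--     return res
-- ===== Notes on version B (the rewrite author's own statement) =====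
-- stated objective: simpler
-- what changed: Replaces A's nested running-sum-of-running-sums (gap*index accumulated into s, s accumulated into res) with a single pass adding xl[i]*(2*i-(n-1)) per sorted element, the closed-form coefficient for the pairwise-distance sum.
import Mathlib
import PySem

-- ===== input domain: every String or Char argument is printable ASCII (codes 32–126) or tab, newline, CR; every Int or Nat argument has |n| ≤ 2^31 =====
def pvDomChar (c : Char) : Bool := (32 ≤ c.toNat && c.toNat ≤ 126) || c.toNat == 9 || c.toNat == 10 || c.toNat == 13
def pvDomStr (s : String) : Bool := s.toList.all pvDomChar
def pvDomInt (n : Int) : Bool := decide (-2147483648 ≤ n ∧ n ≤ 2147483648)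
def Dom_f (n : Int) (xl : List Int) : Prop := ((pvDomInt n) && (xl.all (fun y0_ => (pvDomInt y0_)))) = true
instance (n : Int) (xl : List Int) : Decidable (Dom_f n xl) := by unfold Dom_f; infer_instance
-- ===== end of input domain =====

-- B replaces A's nested running-sum accumulation by one pass with per-element
-- closed-form coefficients (objective: simpler). Both A and B sort xl in place;
-- the equivalence proved here is about the return value.

-- ===== PORT A =====
def f (n : Int) (xl : List Int) : Int :=
  let ys := PySem.List.sorted xl (fun x => x) false
  ((PySem.List.pyRange 1 n 1).foldl
    (fun (st : Int × Int) i =>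
      let s := st.1 + (PySem.List.pyGetD ys i 0 - PySem.List.pyGetD ys (i-1) 0) * i
      (s, st.2 + s)) ((0 : Int), (0 : Int))).2

-- ===== PORT B =====
def f_alt (n : Int) (xl : List Int) : Int :=
  let ys := PySem.List.sorted xl (fun x => x) false
  if n ≤ 1 then 0
  else
    (PySem.List.pyRange 0 n 1).foldl
      (fun res i => res + PySem.List.pyGetD ys i 0 * (2*i - (n-1))) 0

-- ===== PRECONDITION & SPEC =====
-- Pre_f excludes exactly the inputs where A raises IndexError: n > 1 with n > len(xl).
def Pre_f (n : Int) (xl : List Int) : Prop := n ≤ 1 ∨ n ≤ (xl.length : Int)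
instance (n : Int) (xl : List Int) : Decidable (Pre_f n xl) := by unfold Pre_f; infer_instance
def pvWitness_f : Int × List Int := (3, [5, 1, 2])

def Spec_f (n : Int) (xl : List Int) (out : Int) : Prop := out = f_alt n xl
instance (n : Int) (xl : List Int) (out : Int) : Decidable (Spec_f n xl out) := by unfold Spec_f; infer_instance

-- ===== CLAIM (what is proved, stated in full; the proofs are below) =====
def Claim_equal_f : Prop := ∀ (n : Int) (xl : List Int), Dom_f n xl → Pre_f n xl → Spec_f n xl (f n xl)

-- ===== LEMMAS AND PROOFS =====

/-- element access of the sorted list, as a function of a natural index -/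
def pvG (ys : List Int) (k : Nat) : Int := PySem.List.pyGetD ys (k : Int) 0

/-- value of A's inner accumulator `s` after processing index `k` -/
def pvT (ys : List Int) (k : Nat) : Int :=
  (k : Int) * pvG ys k - ∑ j ∈ Finset.range k, pvG ys j

lemma pvA_fold (ys : List Int) (m : Nat) :
    (PySem.List.pyRange 1 ((m : Int) + 1) 1).foldl
      (fun (st : Int × Int) i =>
        let s := st.1 + (PySem.List.pyGetD ys i 0 - PySem.List.pyGetD ys (i-1) 0) * i
        (s, st.2 + s)) ((0 : Int), (0 : Int))
    = (pvT ys m, ∑ i ∈ Finset.range (m + 1), pvT ys i) := by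
  induction m with
  | zero =>
    rw [PySem.List.pyRange_one_eq_nil (by norm_num)]
    simp [pvT, pvG]
  | succ k ih =>
    push_cast
    rw [PySem.List.pyRange_one_succ_right (by omega), List.foldl_append, ih]
    simp only [List.foldl]
    have h1 : ((k : Int) + 1 - 1) = (k : Int) := by ring
    simp only [Prod.mk.injEq]
    refine ⟨?_, ?_⟩
    · simp only [h1, pvT, pvG, Finset.sum_range_succ]
      push_cast
      ring
    · rw [Finset.sum_range_succ _ (k + 1)]
      simp only [h1, pvT, pvG, Finset.sum_range_succ]
      push_cast
      ring

lemma pvB_fold (ys : List Int) (c : Int) (m : Nat) :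
    (PySem.List.pyRange 0 (m : Int) 1).foldl
      (fun res i => res + PySem.List.pyGetD ys i 0 * (2*i - c)) 0
    = ∑ i ∈ Finset.range m, pvG ys i * (2*(i : Int) - c) := by
  induction m with
  | zero =>
    rw [PySem.List.pyRange_one_eq_nil (by norm_num)]
    simp
  | succ k ih =>
    push_cast
    rw [PySem.List.pyRange_one_succ_right (by positivity), List.foldl_append, ih,
        Finset.sum_range_succ]
    simp [pvG]

/-- the combinatorial identity: sum of A's running sums = B's coefficient sum -/
lemma pvSum_eq (ys : List Int) (m : Nat) :
    ∑ i ∈ Finset.range m, pvT ys i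
    = ∑ i ∈ Finset.range m, pvG ys i * (2*(i : Int) - ((m : Int) - 1)) := by
  induction m with
  | zero => simp
  | succ k ih =>
    rw [Finset.sum_range_succ, ih, Finset.sum_range_succ]
    push_cast
    have : ∀ i ∈ Finset.range k,
        pvG ys i * (2*(i : Int) - ((k : Int) + 1 - 1))
        = pvG ys i * (2*(i : Int) - ((k : Int) - 1)) - pvG ys i := by
      intro i _; ring
    rw [Finset.sum_congr rfl this, Finset.sum_sub_distrib]
    simp only [pvT]
    ring

-- ===== VERDICT (by name: the statement is the Claim_ definition above) =====
theorem f_spec : Claim_equal_f := by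
  intro n xl _ _
  unfold Spec_f f f_alt
  by_cases h : n ≤ 1
  · rw [if_pos h, PySem.List.pyRange_one_eq_nil h]
    rfl
  · rw [if_neg h]
    have h0 : 0 ≤ n - 1 := by omega
    obtain ⟨m, hm⟩ : ∃ m : Nat, n = (m : Int) + 1 :=
      ⟨(n - 1).toNat, by omega⟩
    subst hm
    show ((PySem.List.pyRange 1 ((m : Int) + 1) 1).foldl
        (fun (st : Int × Int) i =>
          ((st.1 + (PySem.List.pyGetD (PySem.List.sorted xl (fun x => x) false) i 0
              - PySem.List.pyGetD (PySem.List.sorted xl (fun x => x) false) (i-1) 0) * i),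
           st.2 + (st.1 + (PySem.List.pyGetD (PySem.List.sorted xl (fun x => x) false) i 0
              - PySem.List.pyGetD (PySem.List.sorted xl (fun x => x) false) (i-1) 0) * i)))
        ((0 : Int), (0 : Int))).2
      = (PySem.List.pyRange 0 ((m : Int) + 1) 1).foldl
          (fun res i => res + PySem.List.pyGetD (PySem.List.sorted xl (fun x => x) false) i 0
            * (2*i - ((m : Int) + 1 - 1))) 0
    rw [pvA_fold]
    have h1 : ((m : Int) + 1) = ((m + 1 : Nat) : Int) := by push_cast; ring
    rw [h1, pvB_fold, pvSum_eq]
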